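-- pv_equiv track=rewrite | github.com/qunfengdong/BLCA | 1.subset_db_acc.py | lineage
-- ===== SOURCE A (Python) =====
-- def lineage(tid, allnode, namesdic, nonexist):
--     levels = ["superkingdom", "phylum", "class", "order",
--               "family", "genus", "subspecies", "species"]
--     if tid not in nonexist:
--         r = str()
--         name = namesdic[tid][0]
--         pa, rank = allnode[tid]
--         if rank in levels:
--             r += ":".join([rank, name]) + ";"
--         if pa in nonexist:
--             r += ""
--         else:
--             r += lineage(pa, allnode, namesdic, nonexist)
--         return r
--     else:
--         return ""
-- ===== SOURCE B (Python) =====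
-- def lineage(tid, allnode, namesdic, nonexist):
--     # Two staged passes instead of A's recursion: first collect the parent chain,
--     # then format the ranked nodes and join once (return-value equivalent to A).
--     levels = {"superkingdom", "phylum", "class", "order",
--               "family", "genus", "subspecies", "species"}
--     if tid in nonexist:
--         return ""
--     chain = []
--     node = tid
--     while node not in nonexist:
--         chain.append(node)
--         node = allnode[node][0]
--     return "".join(allnode[n][1] + ":" + namesdic[n][0] + ";"
--                    for n in chain if allnode[n][1] in levels)
-- ===== Notes on version B (the rewrite author's own statement) =====
-- stated objective: alternative
-- what changed: Replaces A's non-tail recursion (which formats and concatenates while unwinding) with two staged passes: a while-loop that only collects the parent-chain node ids into a list, then a single generator expression that formats the ranked nodes and joins them once.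
import Mathlib
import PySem

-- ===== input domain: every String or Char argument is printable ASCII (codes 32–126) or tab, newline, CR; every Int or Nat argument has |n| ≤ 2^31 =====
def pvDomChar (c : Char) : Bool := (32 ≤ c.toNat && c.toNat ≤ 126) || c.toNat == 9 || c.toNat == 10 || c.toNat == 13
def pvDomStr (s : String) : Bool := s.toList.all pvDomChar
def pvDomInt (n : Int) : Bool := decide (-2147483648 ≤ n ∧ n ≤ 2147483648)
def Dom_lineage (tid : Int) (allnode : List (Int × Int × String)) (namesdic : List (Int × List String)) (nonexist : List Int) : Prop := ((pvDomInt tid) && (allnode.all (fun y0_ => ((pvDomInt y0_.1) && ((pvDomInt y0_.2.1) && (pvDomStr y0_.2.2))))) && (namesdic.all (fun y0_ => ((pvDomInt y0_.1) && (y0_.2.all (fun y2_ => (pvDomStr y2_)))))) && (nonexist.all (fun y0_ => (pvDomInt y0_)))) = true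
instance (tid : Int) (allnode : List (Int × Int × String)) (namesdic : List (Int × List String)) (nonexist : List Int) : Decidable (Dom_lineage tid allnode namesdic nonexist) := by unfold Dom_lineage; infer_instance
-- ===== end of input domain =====

-- B replaces A's non-tail recursion by two staged passes — collect the parent-chain node ids, then format the ranked ones and join once (alternative decomposition, same cost; return-value equivalence).


-- shared literal constant: the `levels` collection of both Pythons
def pvLevels : List String :=
  ["superkingdom", "phylum", "class", "order", "family", "genus", "subspecies", "species"]

-- ===== PORT A =====
-- A's recursion, with a fuel guard for totality only: under Pre_lineage the parent
-- chain escapes within allnode.length + 1 steps, so the fuel is never exhausted on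
-- admitted inputs.
def lineageA (allnode : List (Int × Int × String)) (namesdic : List (Int × List String)) (nonexist : List Int) : Nat → Int → String
  | 0, _ => ""
  | f + 1, tid =>
    if tid ∈ nonexist then ""
    else
      match namesdic.lookup tid with
      | none => ""    -- KeyError in Python: excluded by Pre_lineage
      | some names =>
        match PySem.List.pyGet? names 0 with
        | none => ""  -- IndexError in Python: excluded by Pre_lineage
        | some name =>
          match allnode.lookup tid with
          | none => ""  -- KeyError in Python: excluded by Pre_lineage
          | some (pa, rank) =>
            let r := if rank ∈ pvLevels then PySem.Str.join ":" [rank, name] ++ ";" else ""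
            if pa ∈ nonexist then r ++ ""
            else r ++ lineageA allnode namesdic nonexist f pa

def lineage (tid : Int) (allnode : List (Int × Int × String)) (namesdic : List (Int × List String)) (nonexist : List Int) : String :=
  lineageA allnode namesdic nonexist (allnode.length + 1) tid

-- ===== PORT B =====
-- B pass 1: the while-loop collecting the chain of node ids (fuel guard for totality
-- only; a missing allnode key is a Python KeyError, excluded by Pre_lineage).
def walkChain (allnode : List (Int × Int × String)) (nonexist : List Int) : Nat → Int → List Int
  | 0, _ => []
  | f + 1, node =>
    if node ∈ nonexist then []
    else node :: walkChain allnode nonexist f (((allnode.lookup node).getD (node, "")).1)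

-- B pass 2 accessors: allnode[n][1] and namesdic[n][0] (defaults only reached on
-- inputs excluded by Pre_lineage, where Python raises)
def rankOf (allnode : List (Int × Int × String)) (n : Int) : String :=
  ((allnode.lookup n).getD (0, "")).2
def nameOf (namesdic : List (Int × List String)) (n : Int) : String :=
  (PySem.List.pyGet? ((namesdic.lookup n).getD []) 0).getD ""

def lineage_alt (tid : Int) (allnode : List (Int × Int × String)) (namesdic : List (Int × List String)) (nonexist : List Int) : String :=
  if tid ∈ nonexist then ""
  else
    let chain := walkChain allnode nonexist (allnode.length + 1) tid
    PySem.Str.join ""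
      ((chain.filter (fun n => rankOf allnode n ∈ pvLevels)).map
        (fun n => rankOf allnode n ++ ":" ++ nameOf namesdic n ++ ";"))

-- ===== PRECONDITION & SPEC =====
-- one step of the parent chain: none = the walk has escaped (current node in
-- nonexist, or its allnode entry missing — the latter is a KeyError, caught below)
def pvStep (allnode : List (Int × Int × String)) (nonexist : List Int) : Option Int → Option Int
  | none => none
  | some k =>
    if k ∈ nonexist then none
    else match allnode.lookup k with
      | none => none
      | some (pa, _) => some pa

-- a dereferenced node is fine: allnode has it and namesdic has a nonempty list for it
def goodKeyB (allnode : List (Int × Int × String)) (namesdic : List (Int × List String)) (k : Int) : Bool :=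
  (allnode.lookup k).isSome && !((namesdic.lookup k).getD []).isEmpty

def visitedOkB (allnode : List (Int × Int × String)) (namesdic : List (Int × List String)) (nonexist : List Int) : Option Int → Bool
  | none => true
  | some k => nonexist.contains k || goodKeyB allnode namesdic k

-- Pre_lineage is EXACTLY the inputs where A returns (otherwise A raises KeyError,
-- IndexError or RecursionError): the parent chain from tid escapes — it does so
-- within allnode.length+1 steps iff it escapes at all — and every node A
-- dereferences (a chain node not in nonexist) has an allnode entry and a nonempty
-- namesdic entry.
def Pre_lineage (tid : Int) (allnode : List (Int × Int × String)) (namesdic : List (Int × List String)) (nonexist : List Int) : Prop :=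
  tid ∈ nonexist ∨
    ((pvStep allnode nonexist)^[allnode.length + 1] (some tid) = none ∧
     ∀ i ∈ List.range (allnode.length + 1),
       visitedOkB allnode namesdic nonexist ((pvStep allnode nonexist)^[i] (some tid)) = true)

instance (tid : Int) (allnode : List (Int × Int × String)) (namesdic : List (Int × List String)) (nonexist : List Int) : Decidable (Pre_lineage tid allnode namesdic nonexist) := by unfold Pre_lineage; infer_instance

def pvWitness_lineage : Int × (List (Int × Int × String)) × (List (Int × List String)) × List Int :=
  (2, [(2, 1, "species"), (1, 0, "genus")], [(2, ["Escherichia coli"]), (1, ["Escherichia"])], [0])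

def Spec_lineage (tid : Int) (allnode : List (Int × Int × String)) (namesdic : List (Int × List String)) (nonexist : List Int) (out : String) : Prop := out = lineage_alt tid allnode namesdic nonexist
instance (tid : Int) (allnode : List (Int × Int × String)) (namesdic : List (Int × List String)) (nonexist : List Int) (out : String) : Decidable (Spec_lineage tid allnode namesdic nonexist out) := by unfold Spec_lineage; infer_instance

-- ===== CLAIM (what is proved, stated in full; the proofs are below) =====
def Claim_equal_lineage : Prop := ∀ (tid : Int) (allnode : List (Int × Int × String)) (namesdic : List (Int × List String)) (nonexist : List Int), Dom_lineage tid allnode namesdic nonexist → Pre_lineage tid allnode namesdic nonexist → Spec_lineage tid allnode namesdic nonexist (lineage tid allnode namesdic nonexist)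

-- ===== LEMMAS AND PROOFS =====

lemma chars_join_nil_lineage (ls : List (List Char)) : PySem.Chars.join [] ls = ls.flatten := by
  induction ls with
  | nil => simp [pysem]
  | cons a l ih =>
    cases l with
    | nil => simp [pysem]
    | cons b m => simp only [PySem.Chars.join_cons_cons, List.flatten_cons] at *; simp [ih]

lemma strJoin_cons_lineage (x : String) (xs : List String) :
    PySem.Str.join "" (x :: xs) = x ++ PySem.Str.join "" xs := by
  simp [PySem.Str.join, chars_join_nil_lineage, String.ofList_append]

lemma strJoin_nil_lineage : PySem.Str.join "" ([] : List String) = "" := by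
  simp [PySem.Str.join, PySem.Chars.join_nil]

lemma step_none_lineage (allnode : List (Int × Int × String)) (nonexist : List Int) (i : Nat) :
    (pvStep allnode nonexist)^[i] none = none := by
  apply Function.iterate_fixed; rfl

-- the central invariant: with enough fuel, A's recursion from a live good node
-- equals B's format-and-join of the collected chain
lemma main_lineage (allnode : List (Int × Int × String)) (namesdic : List (Int × List String)) (nonexist : List Int) :
    ∀ (f : Nat) (node : Int), node ∉ nonexist →
      (pvStep allnode nonexist)^[f] (some node) = none →
      (∀ i k, (pvStep allnode nonexist)^[i] (some node) = some k →
        visitedOkB allnode namesdic nonexist (some k) = true) →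
      lineageA allnode namesdic nonexist f node =
        PySem.Str.join ""
          (((walkChain allnode nonexist f node).filter (fun n => rankOf allnode n ∈ pvLevels)).map
            (fun n => rankOf allnode n ++ ":" ++ nameOf namesdic n ++ ";")) := by
  intro f
  induction f with
  | zero => intro node _ hesc _; simp at hesc
  | succ f ih =>
    intro node hnon hesc hgood
    have hg0 : visitedOkB allnode namesdic nonexist (some node) = true :=
      hgood 0 node (by simp)
    simp only [visitedOkB, goodKeyB, Bool.or_eq_true, Bool.and_eq_true] at hg0
    rcases hg0 with hg0 | ⟨hA, hN⟩
    · exact absurd (List.contains_iff_mem.mp hg0) hnon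
    obtain ⟨⟨pa, rank⟩, hAl⟩ := Option.isSome_iff_exists.mp hA
    have hNl : ∃ name tail, namesdic.lookup node = some (name :: tail) := by
      cases h : namesdic.lookup node with
      | none => rw [h] at hN; simp at hN
      | some names =>
        rw [h] at hN
        cases names with
        | nil => simp at hN
        | cons a l => exact ⟨a, l, rfl⟩
    obtain ⟨name, tail, hNl⟩ := hNl
    have hstep : pvStep allnode nonexist (some node) = some pa := by
      simp [pvStep, hnon, hAl]
    have hseg : PySem.Str.join ":" [rank, name] ++ ";" = rank ++ ":" ++ name ++ ";" := by
      apply String.toList_inj.mp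
      simp [PySem.Str.join, PySem.Chars.join_cons_cons, PySem.Chars.join_singleton]
    have hrank : rankOf allnode node = rank := by simp [rankOf, hAl]
    have hname : nameOf namesdic node = name := by
      simp [nameOf, hNl]
    simp only [lineageA, walkChain, hNl, hAl, PySem.List.pyGet?_zero_cons, if_neg hnon,
      Option.getD_some, List.filter_cons]
    by_cases hpa : pa ∈ nonexist
    · -- chain stops: walkChain from pa is empty at every fuel
      have hw : walkChain allnode nonexist f pa = [] := by
        cases f with
        | zero => rfl
        | succ g => simp [walkChain, hpa]
      rw [hw]
      by_cases hr : rank ∈ pvLevels <;>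
        simp [hpa, hr, hrank, hname, strJoin_cons_lineage, strJoin_nil_lineage, hseg,
          String.append_assoc, String.append_empty]
    · -- chain continues: use the induction hypothesis at pa
      have hesc' : (pvStep allnode nonexist)^[f] (some pa) = none := by
        rw [← hstep, ← Function.iterate_succ_apply]; exact hesc
      have hgood' : ∀ i k, (pvStep allnode nonexist)^[i] (some pa) = some k →
          visitedOkB allnode namesdic nonexist (some k) = true := by
        intro i k hk
        apply hgood (i + 1) k
        rw [Function.iterate_succ_apply, hstep]; exact hk
      rw [if_neg hpa, ih pa hpa hesc' hgood']
      by_cases hr : rank ∈ pvLevels <;>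
        simp [hr, hrank, hname, strJoin_cons_lineage, hseg,
          String.append_assoc, String.empty_append]

-- ===== VERDICT (by name: the statement is the Claim_ definition above) =====
theorem lineage_spec : Claim_equal_lineage := by
  intro tid allnode namesdic nonexist _ hpre
  unfold Spec_lineage lineage lineage_alt
  by_cases hnon : tid ∈ nonexist
  · simp [lineageA, hnon]
  · rcases hpre with h | ⟨hesc, hgood⟩
    · exact absurd h hnon
    · rw [if_neg hnon]
      apply main_lineage allnode namesdic nonexist (allnode.length + 1) tid hnon hesc
      intro i k hk
      by_cases hi : i < allnode.length + 1
      · have := hgood i (List.mem_range.mpr hi)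
        rw [hk] at this; exact this
      · exfalso
        have : (pvStep allnode nonexist)^[i] (some tid) = none := by
          have : i = (i - (allnode.length + 1)) + (allnode.length + 1) := by omega
          rw [this, Function.iterate_add_apply, hesc, step_none_lineage]
        rw [hk] at this; exact Option.some_ne_none _ this
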